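-- pv_equiv track=rewrite | github.com/GabrielGreslin/sd-attaque | loadData.py | getXYTForClassI
-- ===== SOURCE A (Python) =====
-- def getXYTForClassI(data, classNumber,labels=None):
--
--     x,y,t = ([],[],[])
--     for i,l in enumerate(data):
--         if labels is not None:
--             if(labels[i] == classNumber):
--                 x.append(l[0])
--                 y.append(l[1])
--                 t.append(l[2])
--         else:
--             x.append(l[0])
--             y.append(l[1])
--             t.append(l[2])
--
--     return x,y,t
-- ===== SOURCE B (Python) =====
-- def getXYTForClassI(data, classNumber, labels=None):
--     # filter first, then transpose the selected rows into columns
--     if labels is None: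
--         selected = data
--     else:
--         selected = [row for i, row in enumerate(data) if labels[i] == classNumber]
--     if not selected:
--         return [], [], []
--     cols = list(zip(*selected))
--     return list(cols[0]), list(cols[1]), list(cols[2])
-- ===== Notes on version B (the rewrite author's own statement) =====
-- stated objective: alternative
-- what changed: Replaces the loop that maintains a running triple of appended lists by filter-then-transpose: build the list of selected rows once, then take columns 0-2 of zip(*selected).
import Mathlib
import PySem

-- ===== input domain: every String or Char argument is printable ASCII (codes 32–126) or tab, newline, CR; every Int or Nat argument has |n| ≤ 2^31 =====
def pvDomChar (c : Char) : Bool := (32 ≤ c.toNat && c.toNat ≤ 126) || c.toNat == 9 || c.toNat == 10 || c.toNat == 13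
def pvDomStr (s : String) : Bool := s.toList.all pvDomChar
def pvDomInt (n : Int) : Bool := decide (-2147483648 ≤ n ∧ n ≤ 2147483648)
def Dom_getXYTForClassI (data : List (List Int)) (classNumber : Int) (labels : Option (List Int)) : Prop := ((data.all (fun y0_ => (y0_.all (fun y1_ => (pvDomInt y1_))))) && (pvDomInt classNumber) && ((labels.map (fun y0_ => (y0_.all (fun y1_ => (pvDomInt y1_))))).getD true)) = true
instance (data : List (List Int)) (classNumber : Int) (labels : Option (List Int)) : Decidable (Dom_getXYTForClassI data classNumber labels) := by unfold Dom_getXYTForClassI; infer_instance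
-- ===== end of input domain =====

-- B replaces A's running triple of appended lists by filter-then-transpose (alternative decomposition, same cost).


-- ===== PORT A =====
-- literal port of A: fold over enumerate(data), appending l[0],l[1],l[2] to the running triple.
-- pyGetD with default 0 is exact where Python does not raise (guaranteed by Pre_).
def getXYTForClassI (data : List (List Int)) (classNumber : Int) (labels : Option (List Int)) : List Int × List Int × List Int :=
  (PySem.List.enumerate data 0).foldl
    (fun (acc : List Int × List Int × List Int) p =>
      match labels with
      | some ls =>
        match PySem.List.pyGet? ls p.1 with
        | some v =>
          if v = classNumber then
            (acc.1 ++ [PySem.List.pyGetD p.2 0 0], acc.2.1 ++ [PySem.List.pyGetD p.2 1 0], acc.2.2 ++ [PySem.List.pyGetD p.2 2 0])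
          else acc
        | none => acc  -- Python raises IndexError on labels[i] here; excluded by Pre_
      | none =>
        (acc.1 ++ [PySem.List.pyGetD p.2 0 0], acc.2.1 ++ [PySem.List.pyGetD p.2 1 0], acc.2.2 ++ [PySem.List.pyGetD p.2 2 0]))
    ([], [], [])

-- ===== PORT B =====
-- zip(*rows): columns of length min row-length
def pyZipStar (rows : List (List Int)) : List (List Int) :=
  match rows with
  | [] => []
  | r :: rs =>
    let m := rs.foldl (fun acc row => min acc row.length) r.length
    (List.range m).map (fun j => rows.map (fun row => row.getD j 0))

def getXYTForClassI_alt (data : List (List Int)) (classNumber : Int) (labels : Option (List Int)) : List Int × List Int × List Int :=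
  let selected : List (List Int) :=
    match labels with
    | none => data
    | some ls =>
      (PySem.List.enumerate data 0).filterMap (fun p =>
        match PySem.List.pyGet? ls p.1 with
        | some v => if v = classNumber then some p.2 else none
        | none => none)
  if selected = [] then ([], [], [])
  else
    let cols := pyZipStar selected
    -- cols[0], cols[1], cols[2]: in range under Pre_ (every selected row has ≥ 3 entries)
    (cols.getD 0 [], cols.getD 1 [], cols.getD 2 [])

-- ===== PRECONDITION & SPEC =====
-- Pre_ excludes exactly the inputs on which A raises: labels shorter than data (IndexError on
-- labels[i]), or a selected row (any row when labels is None) with fewer than 3 entries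
-- (IndexError on l[0]/l[1]/l[2]).
def Pre_getXYTForClassI (data : List (List Int)) (classNumber : Int) (labels : Option (List Int)) : Prop :=
  match labels with
  | none => ∀ l ∈ data, 3 ≤ l.length
  | some ls =>
      data.length ≤ ls.length ∧
      ∀ p ∈ PySem.List.enumerate data 0, PySem.List.pyGet? ls p.1 = some classNumber → 3 ≤ p.2.length

instance (data : List (List Int)) (classNumber : Int) (labels : Option (List Int)) : Decidable (Pre_getXYTForClassI data classNumber labels) := by
  unfold Pre_getXYTForClassI; cases labels <;> infer_instance

def pvWitness_getXYTForClassI : List (List Int) × Int × Option (List Int) :=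
  ([[1, 2, 3], [4, 5, 6], [7, 8, 9]], 1, some [1, 0, 1])

def Spec_getXYTForClassI (data : List (List Int)) (classNumber : Int) (labels : Option (List Int)) (out : List Int × List Int × List Int) : Prop := out = getXYTForClassI_alt data classNumber labels
instance (data : List (List Int)) (classNumber : Int) (labels : Option (List Int)) (out : List Int × List Int × List Int) : Decidable (Spec_getXYTForClassI data classNumber labels out) := by unfold Spec_getXYTForClassI; infer_instance

-- ===== CLAIM (what is proved, stated in full; the proofs are below) =====
def Claim_equal_getXYTForClassI : Prop := ∀ (data : List (List Int)) (classNumber : Int) (labels : Option (List Int)), Dom_getXYTForClassI data classNumber labels → Pre_getXYTForClassI data classNumber labels → Spec_getXYTForClassI data classNumber labels (getXYTForClassI data classNumber labels)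

-- ===== LEMMAS AND PROOFS =====

def pvSelOf (c : Int) (ls : List Int) (ps : List (Int × List Int)) : List (List Int) :=
  ps.filterMap (fun p =>
    match PySem.List.pyGet? ls p.1 with
    | some v => if v = c then some p.2 else none
    | none => none)

-- A's loop body, labels = some ls, equals append-of-selected-columns (loop invariant)
lemma pvFoldSome (c : Int) (ls : List Int) (ps : List (Int × List Int))
    (acc : List Int × List Int × List Int) :
    ps.foldl
      (fun (acc : List Int × List Int × List Int) p =>
        match PySem.List.pyGet? ls p.1 with
        | some v =>
          if v = c then
            (acc.1 ++ [PySem.List.pyGetD p.2 0 0], acc.2.1 ++ [PySem.List.pyGetD p.2 1 0], acc.2.2 ++ [PySem.List.pyGetD p.2 2 0])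
          else acc
        | none => acc) acc
    = (acc.1 ++ (pvSelOf c ls ps).map (fun r => PySem.List.pyGetD r 0 0),
       acc.2.1 ++ (pvSelOf c ls ps).map (fun r => PySem.List.pyGetD r 1 0),
       acc.2.2 ++ (pvSelOf c ls ps).map (fun r => PySem.List.pyGetD r 2 0)) := by
  induction ps generalizing acc with
  | nil => simp [pvSelOf]
  | cons p ps ih =>
    cases h : PySem.List.pyGet? ls p.1 with
    | none => simp [pvSelOf, h, ih]
    | some v =>
      by_cases hv : v = c
      · simp [pvSelOf, h, hv, ih]
      · simp [pvSelOf, h, hv, ih]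

-- A's loop body, labels = None
lemma pvFoldNone (ps : List (Int × List Int)) (acc : List Int × List Int × List Int) :
    ps.foldl
      (fun (acc : List Int × List Int × List Int) p =>
        (acc.1 ++ [PySem.List.pyGetD p.2 0 0], acc.2.1 ++ [PySem.List.pyGetD p.2 1 0], acc.2.2 ++ [PySem.List.pyGetD p.2 2 0])) acc
    = (acc.1 ++ ps.map (fun p => PySem.List.pyGetD p.2 0 0),
       acc.2.1 ++ ps.map (fun p => PySem.List.pyGetD p.2 1 0),
       acc.2.2 ++ ps.map (fun p => PySem.List.pyGetD p.2 2 0)) := by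
  induction ps generalizing acc with
  | nil => simp
  | cons p ps ih => simp [ih]

lemma pvMinLen (rs : List (List Int)) (init : Nat) (h0 : 3 ≤ init)
    (h : ∀ r ∈ rs, 3 ≤ r.length) :
    3 ≤ rs.foldl (fun acc row => min acc row.length) init := by
  induction rs generalizing init with
  | nil => simpa using h0
  | cons r rs ih =>
    simp only [List.foldl_cons]
    exact ih _ (le_min h0 (h r (by simp))) (fun r hr => h r (by simp [hr]))

lemma pvZipStarCol (rows : List (List Int)) (j : Nat) (hj : j < 3)
    (hne : rows ≠ []) (h : ∀ r ∈ rows, 3 ≤ r.length) :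
    (pyZipStar rows).getD j [] = rows.map (fun row => row.getD j 0) := by
  cases rows with
  | nil => exact absurd rfl hne
  | cons r rs =>
    have hm : 3 ≤ rs.foldl (fun acc row => min acc row.length) r.length :=
      pvMinLen rs r.length (h r (by simp)) (fun r hr => h r (by simp [hr]))
    simp only [pyZipStar]
    rw [List.getD_eq_getElem?_getD, List.getElem?_map, List.getElem?_range (by omega)]
    simp

lemma pvCol (r : List Int) (_hr : 3 ≤ r.length) :
    PySem.List.pyGetD r 0 0 = r.getD 0 0 ∧ PySem.List.pyGetD r 1 0 = r.getD 1 0 ∧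
    PySem.List.pyGetD r 2 0 = r.getD 2 0 := by
  refine ⟨?_, ?_, ?_⟩ <;> simp [PySem.List.pyGetD_ofNat']

lemma pvSelLen (c : Int) (ls : List Int) (data : List (List Int))
    (h : ∀ p ∈ PySem.List.enumerate data 0, PySem.List.pyGet? ls p.1 = some c → 3 ≤ p.2.length) :
    ∀ r ∈ pvSelOf c ls (PySem.List.enumerate data 0), 3 ≤ r.length := by
  intro r hr
  rcases List.mem_filterMap.mp hr with ⟨p, hp, hpr⟩
  cases hg : PySem.List.pyGet? ls p.1 with
  | none => rw [hg] at hpr; exact absurd hpr (by simp)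
  | some v =>
    rw [hg] at hpr
    by_cases hv : v = c
    · subst hv
      simp only [if_pos] at hpr
      cases hpr
      exact h p hp hg
    · simp [hv] at hpr

-- ===== VERDICT (by name: the statement is the Claim_ definition above) =====
lemma pvMapEnum (data : List (List Int)) (f : List Int → Int) :
    (PySem.List.enumerate data 0).map (fun p => f p.2) = data.map f := by
  conv_rhs => rw [← PySem.List.map_snd_enumerate (xs := data) (s := 0)]
  rw [List.map_map]
  rfl

lemma pvColsEq (sel : List (List Int)) (hlen : ∀ r ∈ sel, 3 ≤ r.length) :
    (sel.map (fun r => PySem.List.pyGetD r 0 0),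
     sel.map (fun r => PySem.List.pyGetD r 1 0),
     sel.map (fun r => PySem.List.pyGetD r 2 0)) =
    (if sel = [] then (([] : List Int), ([] : List Int), ([] : List Int))
     else ((pyZipStar sel).getD 0 [], (pyZipStar sel).getD 1 [], (pyZipStar sel).getD 2 [])) := by
  by_cases hne : sel = []
  · subst hne; simp
  · rw [if_neg hne, pvZipStarCol sel 0 (by omega) hne hlen, pvZipStarCol sel 1 (by omega) hne hlen,
      pvZipStarCol sel 2 (by omega) hne hlen]
    refine Prod.ext ?_ (Prod.ext ?_ ?_) <;> simp only <;>
      exact List.map_congr_left (fun r hr => by have := pvCol r (hlen r hr); tauto)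

theorem getXYTForClassI_spec : Claim_equal_getXYTForClassI := by
  intro data c labels _ hpre
  unfold Spec_getXYTForClassI getXYTForClassI
  cases labels with
  | none =>
    have hlen : ∀ l ∈ data, 3 ≤ l.length := hpre
    rw [pvFoldNone]
    have hB : getXYTForClassI_alt data c none =
        (if data = [] then (([] : List Int), ([] : List Int), ([] : List Int))
         else ((pyZipStar data).getD 0 [], (pyZipStar data).getD 1 [], (pyZipStar data).getD 2 [])) := rfl
    rw [hB, ← pvColsEq data hlen]
    refine Prod.ext ?_ (Prod.ext ?_ ?_) <;> simp only [List.nil_append] <;>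
      first
      | exact pvMapEnum data (fun r => PySem.List.pyGetD r 0 0)
      | exact pvMapEnum data (fun r => PySem.List.pyGetD r 1 0)
      | exact pvMapEnum data (fun r => PySem.List.pyGetD r 2 0)
  | some ls =>
    obtain ⟨-, hsel⟩ := hpre
    rw [pvFoldSome]
    have hlen := pvSelLen c ls data hsel
    have hB : getXYTForClassI_alt data c (some ls) =
        (if pvSelOf c ls (PySem.List.enumerate data 0) = [] then (([] : List Int), ([] : List Int), ([] : List Int))
         else ((pyZipStar (pvSelOf c ls (PySem.List.enumerate data 0))).getD 0 [],
               (pyZipStar (pvSelOf c ls (PySem.List.enumerate data 0))).getD 1 [],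
               (pyZipStar (pvSelOf c ls (PySem.List.enumerate data 0))).getD 2 [])) := rfl
    rw [hB, ← pvColsEq _ hlen]
    simp only [List.nil_append]
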